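-- pv_equiv track=rewrite | github.com/shashankaswath13/T100 | airbus_t100/app.py | check_sketch_order
-- ===== SOURCE A (Python) =====
-- def check_sketch_order(sketch_numbers):
--     expected = 1
--     success = True
--     for page_num, actual_num in sketch_numbers:
--         if actual_num != expected:
--             success = False
--         expected += 1
--     return success
-- ===== SOURCE B (Python) =====
-- def check_sketch_order(sketch_numbers):
--     def prefix_ok(k):
--         # True iff the first k actual numbers are exactly 1, 2, ..., k
--         if k == 0:
--             return True
--         page_num, actual_num = sketch_numbers[k - 1]
--         rest = prefix_ok(k - 1)
--         return rest and actual_num == k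
--     return prefix_ok(len(sketch_numbers))
-- ===== Notes on version B (the rewrite author's own statement) =====
-- stated objective: alternative
-- what changed: Replaces A's forward loop with a running expected-counter and success flag by a back-to-front recursion on the prefix length: the first k entries are in order iff the k-th actual number equals k and the first k-1 are in order.
import Mathlib
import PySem

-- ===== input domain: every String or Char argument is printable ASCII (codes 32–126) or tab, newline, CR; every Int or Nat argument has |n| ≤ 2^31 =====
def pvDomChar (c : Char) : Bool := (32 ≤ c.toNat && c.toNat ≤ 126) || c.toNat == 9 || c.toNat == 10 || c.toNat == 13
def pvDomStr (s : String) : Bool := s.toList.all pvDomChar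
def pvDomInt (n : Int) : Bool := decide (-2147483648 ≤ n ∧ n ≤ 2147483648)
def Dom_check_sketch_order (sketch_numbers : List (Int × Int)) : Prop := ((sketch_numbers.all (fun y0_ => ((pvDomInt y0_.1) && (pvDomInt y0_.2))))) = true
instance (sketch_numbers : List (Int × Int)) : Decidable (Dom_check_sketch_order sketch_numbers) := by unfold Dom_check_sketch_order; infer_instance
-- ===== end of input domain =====

-- B replaces A's forward counter-and-flag loop with a back-to-front recursion on the prefix length ("alternative" decomposition, same O(n) cost).


-- ===== PORT A =====
def check_sketch_order (sketch_numbers : List (Int × Int)) : Bool :=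
  (sketch_numbers.foldl
    (fun (st : Int × Bool) p =>
      (st.1 + 1, if p.2 ≠ st.1 then false else st.2))
    (1, true)).2

-- ===== PORT B =====
-- prefix_ok k: the first k actual numbers are exactly 1, 2, ..., k (recursion from the end)
def csoPrefixOk (xs : List (Int × Int)) : Nat → Bool
  | 0 => true
  | Nat.succ k =>
      match PySem.List.pyGet? xs ((k : Int)) with  -- xs[(k+1) - 1]; always in range when called with k+1 ≤ len
      | some p => csoPrefixOk xs k && (p.2 == ((k : Int) + 1))
      | none => false

def check_sketch_order_alt (sketch_numbers : List (Int × Int)) : Bool :=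
  csoPrefixOk sketch_numbers sketch_numbers.length

-- ===== PRECONDITION & SPEC =====
def Spec_check_sketch_order (sketch_numbers : List (Int × Int)) (out : Bool) : Prop := out = check_sketch_order_alt sketch_numbers
instance (sketch_numbers : List (Int × Int)) (out : Bool) : Decidable (Spec_check_sketch_order sketch_numbers out) := by unfold Spec_check_sketch_order; infer_instance

-- ===== CLAIM (what is proved, stated in full; the proofs are below) =====
def Claim_equal_check_sketch_order : Prop := ∀ (sketch_numbers : List (Int × Int)), Dom_check_sketch_order sketch_numbers → Spec_check_sketch_order sketch_numbers (check_sketch_order sketch_numbers)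

-- ===== LEMMAS AND PROOFS =====

-- A's fold with arbitrary start counter e and flag s equals s && (actuals = e, e+1, …).
theorem check_sketch_order_fold (xs : List (Int × Int)) (e : Int) (s : Bool) :
    (xs.foldl (fun (st : Int × Bool) p => (st.1 + 1, if p.2 ≠ st.1 then false else st.2)) (e, s)).2
      = (s && (xs.map (fun p => p.2) == PySem.List.pyRange e (e + xs.length) 1)) := by
  induction xs generalizing e s with
  | nil => simp [PySem.List.pyRange_one_eq_nil (le_refl e)]
  | cons p t ih =>
    have hlt : e < e + (↑t.length + 1) := by
      have : (0:Int) ≤ t.length := Int.natCast_nonneg _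
      omega
    simp only [List.foldl_cons, ih]
    rw [List.length_cons]
    have : PySem.List.pyRange e (e + (↑(t.length) + 1)) 1
        = e :: PySem.List.pyRange (e+1) (e + (↑(t.length) + 1)) 1 :=
      PySem.List.pyRange_one_cons hlt
    push_cast
    rw [this]
    by_cases h : p.2 = e
    · simp [h]
      ring_nf
    · simp [h]

-- B's recursion at depth k equals "first k actuals = 1..k".
theorem csoPrefixOk_eq (xs : List (Int × Int)) (k : Nat) (hk : k ≤ xs.length) :
    csoPrefixOk xs k
      = ((xs.map (fun p => p.2)).take k == PySem.List.pyRange 1 ((k : Int) + 1) 1) := by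
  induction k with
  | zero => simp [csoPrefixOk, PySem.List.pyRange_one_eq_nil (le_refl 1)]
  | succ k ih =>
    have hklt : k < xs.length := hk
    have hget : PySem.List.pyGet? xs ((k : Int)) = some xs[k] := by
      simp [PySem.List.pyGet?_natCast, List.getElem?_eq_getElem hklt]
    rw [csoPrefixOk, hget]
    rw [ih (Nat.le_of_lt hklt)]
    have htake : (xs.map (fun p => p.2)).take (k + 1)
        = (xs.map (fun p => p.2)).take k ++ [xs[k].2] := by
      have hkm : k < (xs.map (fun p => p.2)).length := by simpa using hklt
      rw [List.take_add_one, List.getElem?_eq_getElem hkm]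
      simp
    have hrange : PySem.List.pyRange 1 (((k + 1 : Nat) : Int) + 1) 1
        = PySem.List.pyRange 1 ((k : Int) + 1) 1 ++ [(k : Int) + 1] := by
      have h1 : (1 : Int) ≤ (k : Int) + 1 := by omega
      push_cast
      exact PySem.List.pyRange_one_succ_right h1
    rw [htake, hrange]
    simp only [← List.concat_eq_append]
    simp

theorem check_sketch_order_spec : Claim_equal_check_sketch_order := by
  intro xs _
  unfold Spec_check_sketch_order check_sketch_order check_sketch_order_alt
  rw [check_sketch_order_fold, csoPrefixOk_eq xs xs.length (le_refl _)]
  simp [add_comm]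
  rw [List.take_of_length_le (by simp)]
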